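-- pv_equiv track=rewrite | github.com/ckelly38/chessprojectserverandsite | server/models.py | genColStringWithAndBeforeLastItem
-- ===== SOURCE A (Python) =====
-- def genColStringWithAndBeforeLastItem(cols):
--     mystr = "";
--     for n in range(len(cols)):
--         if (n + 1 < len(cols)):
--             if (n == 0): mystr += "" + cols[n];
--             else: mystr += ", " + cols[n];
--         else: mystr += ", and " + cols[n];
--     return mystr;
-- ===== SOURCE B (Python) =====
-- def genColStringWithAndBeforeLastItem(cols):
--     if not cols:
--         return ""
--     return ", ".join(cols[:-1]) + ", and " + cols[-1]
-- ===== Notes on version B (the rewrite author's own statement) =====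
-- stated objective: simpler
-- what changed: Replaces the index loop with nested first/middle/last branches by an empty-case guard plus a ', '.join of all-but-last and an explicit ', and '+last append (reproducing the single-element output ', and X').
import Mathlib
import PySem

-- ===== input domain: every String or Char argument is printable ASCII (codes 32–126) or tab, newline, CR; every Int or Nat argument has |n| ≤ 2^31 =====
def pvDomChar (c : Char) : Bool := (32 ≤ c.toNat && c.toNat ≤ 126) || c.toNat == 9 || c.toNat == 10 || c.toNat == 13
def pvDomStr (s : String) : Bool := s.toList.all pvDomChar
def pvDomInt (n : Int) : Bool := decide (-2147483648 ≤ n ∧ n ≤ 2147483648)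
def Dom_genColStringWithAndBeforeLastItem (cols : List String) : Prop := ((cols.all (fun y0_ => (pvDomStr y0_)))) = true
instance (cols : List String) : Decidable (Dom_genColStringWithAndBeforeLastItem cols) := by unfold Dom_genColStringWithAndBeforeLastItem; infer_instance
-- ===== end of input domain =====

-- B replaces A's index loop (nested first/middle/last branches) by an empty-case guard plus
-- ", ".join(cols[:-1]) + ", and " + cols[-1] — simpler decomposition, same output (incl. len-1 → ", and X").

-- ===== PORT A =====
-- literal port of A: index loop over range(len(cols)) with first/middle/last branches
def genColStringWithAndBeforeLastItem (cols : List String) : String :=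
  (PySem.List.pyRange 0 (PySem.List.len cols) 1).foldl
    (fun mystr n =>
      if n + 1 < PySem.List.len cols then
        if n = 0 then mystr ++ ("" ++ PySem.List.pyGetD cols n "")
        else mystr ++ (", " ++ PySem.List.pyGetD cols n "")
      else mystr ++ (", and " ++ PySem.List.pyGetD cols n "")) ""

-- ===== PORT B =====
-- port of B: empty guard, then ", ".join(cols[:-1]) + ", and " + cols[-1]
def genColStringWithAndBeforeLastItem_alt (cols : List String) : String :=
  if cols = [] then ""
  else PySem.Str.join ", " (PySem.List.slice cols none (some (-1))) ++ ", and " ++ PySem.List.pyGetD cols (-1) ""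

-- ===== PRECONDITION & SPEC =====
def Spec_genColStringWithAndBeforeLastItem (cols : List String) (out : String) : Prop := out = genColStringWithAndBeforeLastItem_alt cols
instance (cols : List String) (out : String) : Decidable (Spec_genColStringWithAndBeforeLastItem cols out) := by unfold Spec_genColStringWithAndBeforeLastItem; infer_instance

-- ===== CLAIM (what is proved, stated in full; the proofs are below) =====
def Claim_equal_genColStringWithAndBeforeLastItem : Prop := ∀ (cols : List String), Dom_genColStringWithAndBeforeLastItem cols → Spec_genColStringWithAndBeforeLastItem cols (genColStringWithAndBeforeLastItem cols)

-- ===== LEMMAS AND PROOFS =====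

lemma join_nil_str (sep : String) : PySem.Str.join sep [] = "" := by
  apply String.toList_inj.mp
  simp [PySem.Str.toList_join, PySem.Chars.join_nil]

lemma join_singleton_str (sep x : String) : PySem.Str.join sep [x] = x := by
  apply String.toList_inj.mp
  simp [PySem.Str.toList_join, PySem.Chars.join_singleton]

lemma join_cons_cons_str (sep x y : String) (t : List String) :
    PySem.Str.join sep (x :: y :: t) = x ++ (sep ++ PySem.Str.join sep (y :: t)) := by
  apply String.toList_inj.mp
  simp [PySem.Str.toList_join, PySem.Chars.join_cons_cons]

lemma join_append_singleton (ys : List String) (y : String) :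
    PySem.Str.join ", " (ys ++ [y])
      = if ys = [] then y else PySem.Str.join ", " ys ++ (", " ++ y) := by
  induction ys with
  | nil => simp [join_singleton_str]
  | cons x t ih =>
    cases t with
    | nil => simp [join_cons_cons_str, join_singleton_str]
    | cons a t' =>
      rw [List.cons_append, List.cons_append, join_cons_cons_str,
          show a :: (t' ++ [y]) = (a :: t') ++ [y] from rfl, ih]
      simp [join_cons_cons_str, String.append_assoc]

-- A's loop over the first len-1 indices (rest nonempty keeps every visited index in the middle
-- branches) builds exactly ", ".join of those elements.
lemma prefix_fold (ys rest : List String) (hrest : rest ≠ []) :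
    (PySem.List.pyRange 0 (ys.length : Int) 1).foldl
      (fun mystr n =>
        if n + 1 < PySem.List.len (ys ++ rest) then
          if n = 0 then mystr ++ ("" ++ PySem.List.pyGetD (ys ++ rest) n "")
          else mystr ++ (", " ++ PySem.List.pyGetD (ys ++ rest) n "")
        else mystr ++ (", and " ++ PySem.List.pyGetD (ys ++ rest) n "")) ""
    = PySem.Str.join ", " ys := by
  induction ys using List.reverseRecOn generalizing rest with
  | nil => simp [PySem.List.pyRange_one_eq_nil, join_nil_str]
  | append_singleton ys y ih =>
    have hlen : ((ys ++ [y]).length : Int) = (ys.length : Int) + 1 := by simp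
    rw [hlen, PySem.List.pyRange_one_succ_right (by positivity), List.foldl_append]
    have hassoc : (ys ++ [y]) ++ rest = ys ++ (y :: rest) := by simp
    rw [hassoc, ih (y :: rest) (by simp)]
    have hget : PySem.List.pyGetD (ys ++ y :: rest) (ys.length : Int) "" = y := by
      simp [PySem.List.pyGetD_natCast]
    have hlt : (ys.length : Int) + 1 < PySem.List.len (ys ++ y :: rest) := by
      have : rest.length > 0 := List.length_pos_of_ne_nil hrest
      simp [PySem.List.len_eq]; omega
    simp only [List.foldl_cons, List.foldl_nil, if_pos hlt, hget]
    rw [join_append_singleton]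
    by_cases hys : ys = []
    · simp [hys, join_nil_str]
    · simp [hys]

lemma main_append (ys : List String) (z : String) :
    genColStringWithAndBeforeLastItem (ys ++ [z]) = PySem.Str.join ", " ys ++ (", and " ++ z) := by
  unfold genColStringWithAndBeforeLastItem
  have hrange : PySem.List.pyRange 0 (PySem.List.len (ys ++ [z])) 1
      = PySem.List.pyRange 0 (ys.length : Int) 1 ++ [(ys.length : Int)] := by
    rw [show PySem.List.len (ys ++ [z]) = (ys.length : Int) + 1 by simp [PySem.List.len_eq],
        PySem.List.pyRange_one_succ_right (by positivity)]
  rw [hrange, List.foldl_append, prefix_fold ys [z] (by simp)]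
  have hget : PySem.List.pyGetD (ys ++ [z]) (ys.length : Int) "" = z := by
    simp [PySem.List.pyGetD_natCast]
  have hnlt : ¬ ((ys.length : Int) + 1 < PySem.List.len (ys ++ [z])) := by
    simp [PySem.List.len_eq]
  simp only [List.foldl_cons, List.foldl_nil, if_neg hnlt, hget]

lemma ports_agree (cols : List String) :
    genColStringWithAndBeforeLastItem cols = genColStringWithAndBeforeLastItem_alt cols := by
  induction cols using List.reverseRecOn with
  | nil => decide
  | append_singleton ys z _ =>
    rw [main_append]
    unfold genColStringWithAndBeforeLastItem_alt
    rw [if_neg (by simp)]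
    rw [PySem.List.slice_to_neg_one, List.dropLast_concat,
        PySem.List.pyGetD_neg_one_append_singleton, String.append_assoc]

-- ===== VERDICT (by name: the statement is the Claim_ definition above) =====
theorem genColStringWithAndBeforeLastItem_spec : Claim_equal_genColStringWithAndBeforeLastItem := by
  intro cols _
  unfold Spec_genColStringWithAndBeforeLastItem
  exact ports_agree cols
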